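-- pv_equiv track=rewrite | github.com/highesttt/matrix-line-messenger | scripts/parse-line-traffic.py | categorize_requests
-- ===== SOURCE A (Python) =====
-- from collections import defaultdict
--
-- def categorize_requests(requests: list) -> dict:
--     """Group requests by API category."""
--     categories = defaultdict(list)
--     for req in requests:
--         url = req["url"]
--         if "/api/talk/thrift/" in url:
--             categories["thrift_rpc"].append(req)
--         elif "/api/talk/long-polling/" in url or "/api/operation/receive" in url:
--             categories["long_poll_sse"].append(req)
--         elif "/api/auth/" in url:
--             categories["auth"].append(req)
--         elif "obs.line-apps.com" in url:
--             categories["media_obs"].append(req)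
--         elif "stickershop" in url or "scdn" in url:
--             categories["stickers_cdn"].append(req)
--         elif "/sc/api/" in url or "legy" in url:
--             categories["secondary_api"].append(req)
--         else:
--             categories["other"].append(req)
--     return dict(categories)
-- ===== SOURCE B (Python) =====
-- PATTERNS = [
--     ("/api/talk/thrift/", "thrift_rpc"),
--     ("/api/talk/long-polling/", "long_poll_sse"),
--     ("/api/operation/receive", "long_poll_sse"),
--     ("/api/auth/", "auth"),
--     ("obs.line-apps.com", "media_obs"),
--     ("stickershop", "stickers_cdn"),
--     ("scdn", "stickers_cdn"),
--     ("/sc/api/", "secondary_api"),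
--     ("legy", "secondary_api"),
-- ]
--
--
-- def _category(url):
--     return next((name for pat, name in PATTERNS if pat in url), "other")
--
--
-- def categorize_requests(requests: list) -> dict:
--     """Group requests by API category: tag each request with its category,
--     fix the key order by first appearance, then collect each group with a
--     filter pass per key (staged passes instead of incremental dict building)."""
--     names = [_category(req["url"]) for req in requests]
--     order = list(dict.fromkeys(names))
--     return {k: [req for req, n in zip(requests, names) if n == k] for k in order}
-- ===== Notes on version B (the rewrite author's own statement) =====
-- stated objective: alternative
-- what changed: Instead of one pass that grows a dict of lists under an if/elif ladder, B first maps every request to its category via a flattened first-match pattern list, dedups the names for the key order, and then builds each group with a separate filter pass per category.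
import Mathlib
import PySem

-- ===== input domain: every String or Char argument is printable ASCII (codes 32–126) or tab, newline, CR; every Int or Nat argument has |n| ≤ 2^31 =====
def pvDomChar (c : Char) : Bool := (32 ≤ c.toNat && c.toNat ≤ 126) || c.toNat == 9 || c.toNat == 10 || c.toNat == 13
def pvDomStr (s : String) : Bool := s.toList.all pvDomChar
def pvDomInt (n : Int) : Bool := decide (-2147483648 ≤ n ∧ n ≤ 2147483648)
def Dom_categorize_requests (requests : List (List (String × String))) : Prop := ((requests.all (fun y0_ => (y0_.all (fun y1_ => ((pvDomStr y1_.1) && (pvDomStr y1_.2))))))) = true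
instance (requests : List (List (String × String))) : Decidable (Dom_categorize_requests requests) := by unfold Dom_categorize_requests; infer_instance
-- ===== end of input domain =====

-- B replaces A's single accumulating pass (dict of lists grown under an if/elif ladder) by staged
-- passes: tag each request with its category (flattened first-match pattern list), dedup the names
-- for the key order, then one filter pass per category (alternative decomposition, similar cost).

-- ===== PORT A =====
-- A's loop body: url = req["url"]; if/elif ladder appending to categories[...] (defaultdict(list)).
def pvStepA (d : PySem.Dict String (List (List (String × String)))) (req : List (String × String)) :
    PySem.Dict String (List (List (String × String))) :=
  let url := (List.lookup "url" req).getD ""   -- Pre_ guarantees the key is present (KeyError otherwise)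
  if PySem.Str.isIn "/api/talk/thrift/" url then
    d.insert "thrift_rpc" (d.getD "thrift_rpc" [] ++ [req])
  else if PySem.Str.isIn "/api/talk/long-polling/" url || PySem.Str.isIn "/api/operation/receive" url then
    d.insert "long_poll_sse" (d.getD "long_poll_sse" [] ++ [req])
  else if PySem.Str.isIn "/api/auth/" url then
    d.insert "auth" (d.getD "auth" [] ++ [req])
  else if PySem.Str.isIn "obs.line-apps.com" url then
    d.insert "media_obs" (d.getD "media_obs" [] ++ [req])
  else if PySem.Str.isIn "stickershop" url || PySem.Str.isIn "scdn" url then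
    d.insert "stickers_cdn" (d.getD "stickers_cdn" [] ++ [req])
  else if PySem.Str.isIn "/sc/api/" url || PySem.Str.isIn "legy" url then
    d.insert "secondary_api" (d.getD "secondary_api" [] ++ [req])
  else
    d.insert "other" (d.getD "other" [] ++ [req])

def categorize_requests (requests : List (List (String × String))) : List (String × List (List (String × String))) :=
  (requests.foldl pvStepA PySem.Dict.empty).items

-- ===== PORT B =====
-- B's flattened priority table PATTERNS: (substring, category name) in priority order.
def pvPatterns : List (String × String) :=
  [ ("/api/talk/thrift/", "thrift_rpc"),
    ("/api/talk/long-polling/", "long_poll_sse"),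
    ("/api/operation/receive", "long_poll_sse"),
    ("/api/auth/", "auth"),
    ("obs.line-apps.com", "media_obs"),
    ("stickershop", "stickers_cdn"),
    ("scdn", "stickers_cdn"),
    ("/sc/api/", "secondary_api"),
    ("legy", "secondary_api") ]

-- _category(url) = next((name for pat, name in PATTERNS if pat in url), "other")
def pvCategory (url : String) : String :=
  ((pvPatterns.find? (fun p => PySem.Str.isIn p.1 url)).map (·.2)).getD "other"

-- names = [_category(req["url"]) ...]; order = list(dict.fromkeys(names));
-- {k: [req for req, n in zip(requests, names) if n == k] for k in order}
def categorize_requests_alt (requests : List (List (String × String))) : List (String × List (List (String × String))) :=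
  let names := requests.map (fun req => pvCategory ((List.lookup "url" req).getD ""))
  let order := PySem.List.dedup names
  order.map (fun k => (k, ((requests.zip names).filter (fun p => p.2 == k)).map (·.1)))

-- ===== PRECONDITION & SPEC =====
-- Pre_ excludes exactly the requests lacking a "url" key, on which A raises KeyError (and B does too).
def Pre_categorize_requests (requests : List (List (String × String))) : Prop :=
  requests.all (fun req => req.any (fun kv => kv.1 == "url")) = true
instance (requests : List (List (String × String))) : Decidable (Pre_categorize_requests requests) := by unfold Pre_categorize_requests; infer_instance
def pvWitness_categorize_requests : (List (List (String × String))) :=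
  [[("url", "/api/auth/login"), ("status", "200")], [("url", "https://legy.example/x")]]

def Spec_categorize_requests (requests : List (List (String × String))) (out : List (String × List (List (String × String)))) : Prop := out = categorize_requests_alt requests
instance (requests : List (List (String × String))) (out : List (String × List (List (String × String)))) : Decidable (Spec_categorize_requests requests out) := by unfold Spec_categorize_requests; infer_instance

-- ===== CLAIM (what is proved, stated in full; the proofs are below) =====
def Claim_equal_categorize_requests : Prop := ∀ (requests : List (List (String × String))), Dom_categorize_requests requests → Pre_categorize_requests requests → Spec_categorize_requests requests (categorize_requests requests)

-- ===== LEMMAS AND PROOFS =====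

-- The category A's if/elif ladder selects for a url (proof-side helper).
def pvLadderName (u : String) : String :=
  if PySem.Str.isIn "/api/talk/thrift/" u then "thrift_rpc"
  else if PySem.Str.isIn "/api/talk/long-polling/" u || PySem.Str.isIn "/api/operation/receive" u then "long_poll_sse"
  else if PySem.Str.isIn "/api/auth/" u then "auth"
  else if PySem.Str.isIn "obs.line-apps.com" u then "media_obs"
  else if PySem.Str.isIn "stickershop" u || PySem.Str.isIn "scdn" u then "stickers_cdn"
  else if PySem.Str.isIn "/sc/api/" u || PySem.Str.isIn "legy" u then "secondary_api"
  else "other"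

-- The key A appends under for a request.
def pvKey (req : List (String × String)) : String := pvLadderName ((List.lookup "url" req).getD "")

-- First match over the flattened pattern table = the ladder.
lemma pvCategory_eq_ladder (u : String) : pvCategory u = pvLadderName u := by
  simp only [pvCategory, pvPatterns, pvLadderName, List.find?]
  cases c1 : PySem.Str.isIn "/api/talk/thrift/" u <;>
  cases c2 : PySem.Str.isIn "/api/talk/long-polling/" u <;>
  cases c3 : PySem.Str.isIn "/api/operation/receive" u <;>
  cases c4 : PySem.Str.isIn "/api/auth/" u <;>
  cases c5 : PySem.Str.isIn "obs.line-apps.com" u <;>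
  cases c6 : PySem.Str.isIn "stickershop" u <;>
  cases c7 : PySem.Str.isIn "scdn" u <;>
  cases c8 : PySem.Str.isIn "/sc/api/" u <;>
  cases c9 : PySem.Str.isIn "legy" u <;>
  simp

-- A's ladder body is a single Dict.modify at the selected key.
lemma pvStepA_eq (d : PySem.Dict String (List (List (String × String)))) (req : List (String × String)) :
    pvStepA d req = d.modify (pvKey req) [] (· ++ [req]) := by
  simp only [pvStepA, pvKey, pvLadderName]
  split_ifs <;> rfl


-- A's dict-of-lists fold, characterised: keys in first-appearance order, each mapped to the
-- filtered requests of its category.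
lemma pvFoldItems (requests : List (List (String × String))) :
    (requests.foldl (fun d req => d.modify (pvKey req) [] (· ++ [req])) PySem.Dict.empty).items
    = (PySem.Set.ofList (requests.map pvKey)).map
        (fun k => (k, requests.filter (fun r => pvKey r == k))) := by
  have hf : requests.foldl (fun d req => d.modify (pvKey req) [] (· ++ [req])) PySem.Dict.empty
      = (requests.map (fun r => (pvKey r, r))).foldl (fun d p => d.modify p.1 [] (· ++ [p.2])) PySem.Dict.empty := by
    rw [List.foldl_map]
  rw [hf]
  set pairs := requests.map (fun r => (pvKey r, r)) with hp
  have hkeys : ((pairs.foldl (fun d p => d.modify p.1 [] (· ++ [p.2])) PySem.Dict.empty)).keys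
      = PySem.Set.ofList (requests.map pvKey) := by
    rw [PySem.Dict.keys_foldl_modify_key (key := Prod.fst)]
    simp [hp, List.map_map, Function.comp_def, PySem.Set.update_nil_left]
  have hnd : ((pairs.foldl (fun d p => d.modify p.1 [] (· ++ [p.2])) PySem.Dict.empty)).keys.Nodup := by
    rw [hkeys]; exact PySem.Set.nodup_ofList _
  rw [PySem.Dict.items_eq_map_keys _ hnd [], hkeys]
  refine List.map_congr_left (fun k hk => ?_)
  rw [PySem.Dict.getD_foldl_modify_append]
  simp [hp, List.filter_map, Function.comp_def, PySem.Dict.getD_empty]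


-- ===== VERDICT (by name: the statement is the Claim_ definition above) =====

theorem categorize_requests_spec : Claim_equal_categorize_requests := by
  intro requests _ _
  unfold Spec_categorize_requests categorize_requests categorize_requests_alt
  have hstep : pvStepA = fun d req => d.modify (pvKey req) [] (· ++ [req]) :=
    funext fun d => funext fun req => pvStepA_eq d req
  rw [hstep, pvFoldItems requests]
  simp only [pvCategory_eq_ladder]
  have hkey : (fun req => pvLadderName ((List.lookup "url" req).getD "")) = pvKey := rfl
  rw [hkey, PySem.List.dedup_eq_ofList, ← List.map_prod_left_eq_zip]
  refine List.map_congr_left fun k hk => ?_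
  simp [List.filter_map, Function.comp_def]
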